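-- pv_equiv track=rewrite | github.com/15814/algorithm | sorts/xiaohe_wenti.py | truemethod
-- ===== SOURCE A (Python) =====
-- def truemethod(elements: list):
--     sum = 0
--     for i in range(len(elements)):
--         j = 0
--         while j < i:
--             if elements[j] < elements[i]:
--                 sum += elements[j]
--             j += 1
--
--     return sum
-- ===== SOURCE B (Python) =====
-- def truemethod(elements: list):
--     # Divide and conquer: answer(xs) = answer(L) + answer(R) + cross(L, R),
--     # where cross sums, over pairs x in L, y in R with x < y, the value x.
--     # cross is computed by sorting both halves and sweeping with a two-pointer
--     # running prefix sum, so the whole thing is O(n log^2 n).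
--     def solve(xs):
--         n = len(xs)
--         if n <= 1:
--             return 0
--         L = xs[:n // 2]
--         R = xs[n // 2:]
--         sL = sorted(L)
--         sR = sorted(R)
--         p = 0
--         acc = 0
--         cross = 0
--         for y in sR:
--             while p < len(sL) and sL[p] < y:
--                 acc += sL[p]
--                 p += 1
--             cross += acc
--         return solve(L) + solve(R) + cross
--     return solve(elements)
-- ===== Notes on version B (the rewrite author's own statement) =====
-- stated objective: faster
-- what changed: Replaces A's O(n^2) nested index loops by divide and conquer: recursively solve the two halves and add the cross contribution, computed by sorting both halves and a two-pointer sweep with a running prefix sum, for O(n log^2 n) total.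
import Mathlib
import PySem

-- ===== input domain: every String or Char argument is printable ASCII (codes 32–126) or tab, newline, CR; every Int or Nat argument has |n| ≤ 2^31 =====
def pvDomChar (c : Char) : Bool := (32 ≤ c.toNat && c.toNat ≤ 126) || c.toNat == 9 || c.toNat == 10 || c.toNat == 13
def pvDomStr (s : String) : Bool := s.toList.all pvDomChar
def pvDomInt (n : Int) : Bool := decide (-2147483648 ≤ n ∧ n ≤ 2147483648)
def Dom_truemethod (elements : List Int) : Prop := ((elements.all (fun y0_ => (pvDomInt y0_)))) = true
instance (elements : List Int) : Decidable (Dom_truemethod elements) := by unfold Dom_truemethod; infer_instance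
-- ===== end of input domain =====

-- B replaces A's O(n^2) nested loops by divide and conquer with sorted halves and a
-- two-pointer prefix-sum sweep for the cross term (measurably faster).

-- ===== PORT A =====
-- the 'while j < i' loop of A, carrying the running sum
def whileA (elements : List Int) (i : Nat) (j : Nat) (s : Int) : Int :=
  if j < i then
    whileA elements i (j + 1)
      (if PySem.List.pyGetD elements (j : Int) 0 < PySem.List.pyGetD elements (i : Int) 0 then
        s + PySem.List.pyGetD elements (j : Int) 0
      else s)
  else s
termination_by i - j

def truemethod (elements : List Int) : Int :=
  (List.range elements.length).foldl (fun s i => whileA elements i 0 s) 0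

-- ===== PORT B =====
-- the 'while p < len(sL) and sL[p] < y' loop of B's sweep; returns the updated (p, acc)
def sweepWhile (sL : List Int) (y : Int) (p : Nat) (acc : Int) : Nat × Int :=
  if h : p < sL.length ∧ PySem.List.pyGetD sL (p : Int) 0 < y then
    sweepWhile sL y (p + 1) (acc + PySem.List.pyGetD sL (p : Int) 0)
  else (p, acc)
termination_by sL.length - p

-- the 'for y in sR' loop of B's sweep, carrying (p, acc, cross)
def sweepFor (sL : List Int) (ys : List Int) (p : Nat) (acc : Int) (cross : Int) : Int :=
  match ys with
  | [] => cross
  | y :: t =>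
    let pa := sweepWhile sL y p acc
    sweepFor sL t pa.1 pa.2 (cross + pa.2)

-- B's recursive solve; xs[:n//2] / xs[n//2:] are take/drop (exact: 0 ≤ n//2 ≤ len xs)
def solveB (xs : List Int) : Int :=
  if h : xs.length ≤ 1 then 0
  else
    let L := xs.take (xs.length / 2)
    let R := xs.drop (xs.length / 2)
    solveB L + solveB R +
      sweepFor (PySem.List.sorted L (fun x => x) false)
               (PySem.List.sorted R (fun x => x) false) 0 0 0
termination_by xs.length
decreasing_by
  · simp only [List.length_take]; omega
  · simp only [List.length_drop]; omega

def truemethod_alt (elements : List Int) : Int := solveB elements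

-- ===== PRECONDITION & SPEC =====
def Spec_truemethod (elements : List Int) (out : Int) : Prop := out = truemethod_alt elements
instance (elements : List Int) (out : Int) : Decidable (Spec_truemethod elements out) := by unfold Spec_truemethod; infer_instance

-- ===== CLAIM (what is proved, stated in full; the proofs are below) =====
def Claim_equal_truemethod : Prop := ∀ (elements : List Int), Dom_truemethod elements → Spec_truemethod elements (truemethod elements)

-- ===== LEMMAS AND PROOFS =====

-- the pairwise summand: elements[j] if elements[j] < elements[i], else 0
def pvPhi (e : List Int) (j i : Nat) : Int :=
  if e.getD j 0 < e.getD i 0 then e.getD j 0 else 0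

lemma whileA_eq (e : List Int) (i : Nat) :
    ∀ (j : Nat) (s : Int), whileA e i j s = s + ∑ k ∈ Finset.Ico j i, pvPhi e k i := by
  intro j s
  generalize h : i - j = d
  induction d generalizing j s with
  | zero =>
    have hji : ¬ j < i := by omega
    rw [whileA]
    simp [hji, Finset.Ico_eq_empty (by omega : ¬ j < i)]
  | succ d ih =>
    have hj : j < i := by omega
    rw [whileA, if_pos hj, ih _ _ (by omega),
      Finset.sum_eq_sum_Ico_succ_bot hj]
    simp only [PySem.List.pyGetD_natCast, pvPhi]
    split_ifs <;> ring

lemma foldl_whileA (e : List Int) :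
    ∀ (n : Nat) (s : Int),
      (List.range n).foldl (fun s i => whileA e i 0 s) s
        = s + ∑ i ∈ Finset.range n, ∑ j ∈ Finset.Ico 0 i, pvPhi e j i := by
  intro n
  induction n with
  | zero => simp
  | succ n ih =>
    intro s
    rw [List.range_succ, List.foldl_append, ih, Finset.sum_range_succ]
    simp [whileA_eq]
    ring

lemma truemethod_eq_sum (e : List Int) :
    truemethod e = ∑ i ∈ Finset.range e.length, ∑ j ∈ Finset.Ico 0 i, pvPhi e j i := by
  rw [truemethod, foldl_whileA]
  ring

-- canonical spec, recursing on the LAST element: Hspec (e ++ [x]) = Hspec e + sum of earlier elements < x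
def Hrev : List Int → Int
  | [] => 0
  | x :: rest => (rest.reverse.filter (fun a => a < x)).sum + Hrev rest

def Hspec (xs : List Int) : Int := Hrev xs.reverse

lemma Hspec_nil : Hspec ([] : List Int) = 0 := rfl

lemma Hspec_snoc (e : List Int) (x : Int) :
    Hspec (e ++ [x]) = Hspec e + (e.filter (fun a => a < x)).sum := by
  simp [Hspec, Hrev]
  ring

-- list-level form of the inner Finset sum at one fixed upper index
lemma filter_sum_eq (x : Int) (e : List Int) :
    (e.filter (fun a => a < x)).sum
      = ∑ j ∈ Finset.range e.length, (if e.getD j 0 < x then e.getD j 0 else 0) := by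
  induction e with
  | nil => simp
  | cons a t ih =>
    rw [List.filter_cons]
    by_cases h : a < x
    · simp only [h, decide_true, if_true, List.sum_cons, List.length_cons,
        Finset.sum_range_succ']
      simp [h, ih]
      ring
    · simp only [h, decide_false, List.length_cons, Finset.sum_range_succ']
      simp [h, ih]

lemma Hspec_eq_sum (e : List Int) :
    Hspec e = ∑ i ∈ Finset.range e.length, ∑ j ∈ Finset.Ico 0 i, pvPhi e j i := by
  induction e using List.reverseRecOn with
  | nil => simp [Hspec_nil]
  | append_singleton e x ih =>
    rw [Hspec_snoc, ih]
    have hn : (e ++ [x]).length = e.length + 1 := by simp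
    rw [hn, Finset.sum_range_succ]
    have h1 : ∀ i ∈ Finset.range e.length,
        ∑ j ∈ Finset.Ico 0 i, pvPhi (e ++ [x]) j i = ∑ j ∈ Finset.Ico 0 i, pvPhi e j i := by
      intro i hi
      refine Finset.sum_congr rfl fun j hj => ?_
      have hie : i < e.length := Finset.mem_range.mp hi
      have hje : j < e.length := by
        have := (Finset.mem_Ico.mp hj).2; omega
      simp [pvPhi, List.getD_eq_getElem?_getD, List.getElem?_append_left, hie, hje]
    rw [Finset.sum_congr rfl h1]
    have h2 : ∑ j ∈ Finset.Ico 0 e.length, pvPhi (e ++ [x]) j e.length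
        = (e.filter (fun a => a < x)).sum := by
      rw [filter_sum_eq, Finset.range_eq_Ico]
      refine Finset.sum_congr rfl fun j hj => ?_
      have hje : j < e.length := (Finset.mem_Ico.mp hj).2
      simp [pvPhi, List.getD_eq_getElem?_getD, List.getElem?_append_left, hje]
    rw [h2]

-- the cross term: for each y in R, the sum of elements of L smaller than y
def crossSpec (L R : List Int) : Int :=
  (R.map (fun y => (L.filter (fun a => a < y)).sum)).sum

lemma Hspec_append (L R : List Int) :
    Hspec (L ++ R) = Hspec L + Hspec R + crossSpec L R := by
  induction R using List.reverseRecOn with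
  | nil => simp [crossSpec, Hspec_nil]
  | append_singleton R x ih =>
    rw [← List.append_assoc, Hspec_snoc, ih, Hspec_snoc]
    simp [crossSpec, List.filter_append]
    ring

lemma crossSpec_perm {L L' R R' : List Int} (hL : L'.Perm L) (hR : R'.Perm R) :
    crossSpec L' R' = crossSpec L R := by
  unfold crossSpec
  have hf : ∀ y : Int, (L'.filter (fun a => a < y)).sum = (L.filter (fun a => a < y)).sum :=
    fun y => (hL.filter _).sum_eq
  calc (R'.map (fun y => (L'.filter (fun a => a < y)).sum)).sum
      = (R'.map (fun y => (L.filter (fun a => a < y)).sum)).sum := by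
        congr 1; exact List.map_congr_left fun y _ => hf y
    _ = (R.map (fun y => (L.filter (fun a => a < y)).sum)).sum :=
        (hR.map _).sum_eq

-- the while loop, on a sorted list with a valid state, lands exactly on the '< y' prefix
lemma sweepWhile_spec (sL : List Int) (hs : sL.Pairwise (· ≤ ·)) (y : Int) :
    ∀ (p : Nat) (acc : Int), p ≤ sL.length → acc = (sL.take p).sum →
      (∀ k, k < p → sL.getD k 0 < y) →
      (sweepWhile sL y p acc).1 ≤ sL.length ∧
      (sweepWhile sL y p acc).2 = (sL.take (sweepWhile sL y p acc).1).sum ∧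
      (∀ k, k < (sweepWhile sL y p acc).1 → sL.getD k 0 < y) ∧
      sL.filter (fun a => a < y) = sL.take (sweepWhile sL y p acc).1 := by
  intro p acc hp hacc hlt
  generalize hd : sL.length - p = d
  induction d generalizing p acc with
  | zero =>
    have hpe : p = sL.length := by omega
    rw [sweepWhile]
    have hcond : ¬ (p < sL.length ∧ PySem.List.pyGetD sL (p : Int) 0 < y) := by
      intro h; omega
    rw [dif_neg hcond]
    refine ⟨hp, hacc, hlt, ?_⟩
    subst hpe
    rw [List.take_length]
    apply List.filter_eq_self.mpr
    intro a ha
    obtain ⟨k, hk, rfl⟩ := List.mem_iff_getElem.mp ha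
    have h := hlt k hk
    rw [List.getD_eq_getElem sL 0 hk] at h
    simpa using h
  | succ d ih =>
    have hplen : p < sL.length := by omega
    rw [sweepWhile]
    by_cases hc : PySem.List.pyGetD sL (p : Int) 0 < y
    · rw [dif_pos ⟨hplen, hc⟩]
      have hget : PySem.List.pyGetD sL (p : Int) 0 = sL.getD p 0 := by
        simp [PySem.List.pyGetD_natCast]
      refine ih (p + 1) _ (by omega) ?_ ?_ (by omega)
      · rw [hget, hacc, List.getD_eq_getElem sL 0 hplen, List.sum_take_succ sL p hplen]
      · intro k hk
        rcases Nat.lt_succ_iff_lt_or_eq.mp hk with h | h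
        · exact hlt k h
        · subst h; rw [← hget]; exact hc
    · rw [dif_neg (by intro h; exact hc h.2)]
      refine ⟨hp, hacc, hlt, ?_⟩
      -- sL = take p ++ drop p : prefix all < y, suffix all ≥ y (sorted, sL[p] ≥ y)
      have hgety : ¬ sL.getD p 0 < y := by
        intro h; exact hc (by simpa [PySem.List.pyGetD_natCast] using h)
      have hpa : y ≤ sL[p] := by
        rw [List.getD_eq_getElem sL 0 hplen] at hgety; omega
      have hpw := List.pairwise_iff_getElem.mp hs
      have h1 : (sL.take p).filter (fun a => a < y) = sL.take p := by
        apply List.filter_eq_self.mpr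
        intro a ha
        obtain ⟨k, hk, rfl⟩ := List.mem_iff_getElem.mp ha
        have hk' : k < p := by simp [List.length_take] at hk; omega
        have := hlt k hk'
        have hkl : k < sL.length := by omega
        rw [List.getElem_take]
        rw [List.getD_eq_getElem sL 0 hkl] at this
        simpa using this
      have h2 : (sL.drop p).filter (fun a => a < y) = [] := by
        apply List.filter_eq_nil_iff.mpr
        intro a ha
        obtain ⟨k, hk, rfl⟩ := List.mem_iff_getElem.mp ha
        have hkl : p + k < sL.length := by
          have := hk; simp [List.length_drop] at this; omega
        rw [List.getElem_drop]
        have hle : sL[p] ≤ sL[p + k] := by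
          cases k with
          | zero => simp
          | succ k' => exact hpw p (p + (k' + 1)) hplen hkl (by omega)
        simp only [decide_eq_true_eq]
        omega
      show List.filter (fun a => decide (a < y)) sL = List.take p sL
      calc List.filter (fun a => decide (a < y)) sL
          = List.filter (fun a => decide (a < y)) (List.take p sL ++ List.drop p sL) := by
            rw [List.take_append_drop]
        _ = List.take p sL := by rw [List.filter_append, h1, h2, List.append_nil]

-- the for loop: with sorted sL and nondecreasing ys it accumulates the cross term
lemma sweepFor_spec (sL : List Int) (hs : sL.Pairwise (· ≤ ·)) :
    ∀ (ys : List Int), ys.Pairwise (· ≤ ·) →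
      ∀ (p : Nat) (acc cross : Int), p ≤ sL.length → acc = (sL.take p).sum →
        (∀ y ∈ ys, ∀ k, k < p → sL.getD k 0 < y) →
        sweepFor sL ys p acc cross = cross + crossSpec sL ys := by
  intro ys
  induction ys with
  | nil => intro _ p acc cross _ _ _; simp [sweepFor, crossSpec]
  | cons y t ih =>
    intro hys p acc cross hp hacc hlt
    obtain ⟨hyt, ht⟩ := List.pairwise_cons.mp hys
    obtain ⟨hq, hacc', hlt', hfil⟩ :=
      sweepWhile_spec sL hs y p acc hp hacc (hlt y (List.mem_cons_self))
    rw [sweepFor]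
    rw [ih ht (sweepWhile sL y p acc).1 (sweepWhile sL y p acc).2 _ hq hacc' ?_]
    · have : (sweepWhile sL y p acc).2 = (sL.filter (fun a => a < y)).sum := by
        rw [hfil]; exact hacc'
      rw [this]
      simp [crossSpec]
      ring
    · intro y' hy' k hk
      exact lt_of_lt_of_le (hlt' k hk) (hyt y' hy')

lemma solveB_eq_Hspec : ∀ (n : Nat) (xs : List Int), xs.length ≤ n → solveB xs = Hspec xs := by
  intro n
  induction n with
  | zero =>
    intro xs hx
    have : xs = [] := List.length_eq_zero_iff.mp (by omega)
    subst this
    rw [solveB]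
    simp [Hspec_nil]
  | succ n ih =>
    intro xs hx
    rw [solveB]
    by_cases h1 : xs.length ≤ 1
    · rw [dif_pos h1]
      match xs, h1 with
      | [], _ => simp [Hspec_nil]
      | [x], _ => simp [Hspec, Hrev]
    · rw [dif_neg h1]
      show solveB (xs.take (xs.length / 2)) + solveB (xs.drop (xs.length / 2)) +
          sweepFor (PySem.List.sorted (xs.take (xs.length / 2)) (fun x => x) false)
                   (PySem.List.sorted (xs.drop (xs.length / 2)) (fun x => x) false) 0 0 0
        = Hspec xs
      have h2 : 2 ≤ xs.length := by omega
      have hLlen : (xs.take (xs.length / 2)).length ≤ n := by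
        simp only [List.length_take]; omega
      have hRlen : (xs.drop (xs.length / 2)).length ≤ n := by
        simp only [List.length_drop]; omega
      rw [ih _ hLlen, ih _ hRlen]
      have hsw := sweepFor_spec (PySem.List.sorted (xs.take (xs.length / 2)) (fun x => x) false)
        (PySem.List.sorted_pairwise ..)
        (PySem.List.sorted (xs.drop (xs.length / 2)) (fun x => x) false)
        (PySem.List.sorted_pairwise ..)
        0 0 0 (by omega) (by simp) (by intro y _ k hk; omega)
      rw [hsw]
      rw [crossSpec_perm (PySem.List.sorted_perm ..) (PySem.List.sorted_perm ..)]
      have happ := Hspec_append (xs.take (xs.length / 2)) (xs.drop (xs.length / 2))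
      rw [List.take_append_drop] at happ
      rw [happ]
      ring

-- ===== VERDICT (by name: the statement is the Claim_ definition above) =====
theorem truemethod_spec : Claim_equal_truemethod := by
  intro e _
  show truemethod e = truemethod_alt e
  rw [truemethod_eq_sum, truemethod_alt, solveB_eq_Hspec e.length e le_rfl, Hspec_eq_sum]
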